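-- pv_equiv track=rewrite | github.com/hshk99/Autopack | src/autopack/task_generation/task_effectiveness_tracker.py | _find_common_error_pattern
-- ===== SOURCE A (Python) =====
-- def _find_common_error_pattern(errors: list[str]) -> str:
--     """Find common pattern across error messages.
--
--     IMP-LOOP-022: Analyzes error messages to find common patterns that
--     might indicate the root cause of repeated failures.
--
--     Args:
--         errors: List of error messages to analyze.
--
--     Returns:
--         Common error pattern or a summary of the errors.
--     """
--     if not errors:
--         return "Unknown error pattern"
--
--     # Simple pattern detection: find common substrings
--     if len(errors) == 1:
--         return errors[0][:200] if len(errors[0]) > 200 else errors[0]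
--
--     # Find common words across all errors
--     word_sets = [set(err.lower().split()) for err in errors]
--     common_words = word_sets[0]
--     for ws in word_sets[1:]:
--         common_words = common_words.intersection(ws)
--
--     # Remove common stop words
--     stop_words = {"the", "a", "an", "in", "on", "at", "to", "for", "is", "was", "error"}
--     common_words = common_words - stop_words
--
--     if common_words:
--         return f"Common pattern: {', '.join(sorted(common_words)[:10])}"
--
--     # Fall back to first error summary
--     return errors[0][:200] if len(errors[0]) > 200 else errors[0]
-- ===== SOURCE B (Python) =====
-- def _find_common_error_pattern(errors: list[str]) -> str:
--     """Find common pattern across error messages (tally-then-threshold variant)."""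
--     if not errors:
--         return "Unknown error pattern"
--
--     first = errors[0][:200] if len(errors[0]) > 200 else errors[0]
--     if len(errors) == 1:
--         return first
--
--     # One pass: count in how many messages each distinct word appears
--     counts = {}
--     for err in errors:
--         for w in set(err.lower().split()):
--             counts[w] = counts.get(w, 0) + 1
--
--     stop_words = {"the", "a", "an", "in", "on", "at", "to", "for", "is", "was", "error"}
--     common = sorted(w for w, c in counts.items()
--                     if c == len(errors) and w not in stop_words)
--     if common:
--         return f"Common pattern: {', '.join(common[:10])}"
--     return first
-- ===== Notes on version B (the rewrite author's own statement) =====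
-- stated objective: alternative
-- what changed: Replaces the progressive pairwise set intersection over per-message word sets with a single-pass tally (dict counter of per-message distinct words) followed by a count==len(errors) threshold selection.
import Mathlib
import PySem

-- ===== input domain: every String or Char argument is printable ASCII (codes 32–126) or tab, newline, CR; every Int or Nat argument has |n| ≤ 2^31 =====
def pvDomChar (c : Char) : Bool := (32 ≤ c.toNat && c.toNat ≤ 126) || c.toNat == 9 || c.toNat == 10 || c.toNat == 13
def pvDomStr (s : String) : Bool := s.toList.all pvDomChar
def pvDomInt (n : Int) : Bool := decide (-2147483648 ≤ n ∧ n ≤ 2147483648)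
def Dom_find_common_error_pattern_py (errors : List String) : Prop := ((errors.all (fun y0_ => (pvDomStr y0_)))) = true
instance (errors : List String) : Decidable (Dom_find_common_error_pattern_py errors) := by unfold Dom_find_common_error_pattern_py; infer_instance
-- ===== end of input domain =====

-- B replaces A's progressive set intersection by a one-pass word tally with a count = len(errors) threshold (alternative decomposition, same cost).

-- ===== PORT A =====
-- set(err.lower().split())
def pvWordsOf (err : String) : PySem.Set String :=
  PySem.Set.ofList (PySem.Str.split₀ (PySem.Str.lower err))

def pvStopWords : PySem.Set String :=
  PySem.Set.ofList ["the", "a", "an", "in", "on", "at", "to", "for", "is", "was", "error"]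

-- errors[0][:200] if len(errors[0]) > 200 else errors[0]
def pvFirstSummary (e0 : String) : String :=
  if 200 < PySem.Str.len e0 then PySem.Str.slice e0 none (some 200) else e0

def find_common_error_pattern_py (errors : List String) : String :=
  match errors with
  | [] => "Unknown error pattern"
  | e0 :: rest =>
    if rest.length = 0 then pvFirstSummary e0
    else
      let word_sets := (e0 :: rest).map pvWordsOf
      let common_words := (word_sets.drop 1).foldl PySem.Set.inter (word_sets.headD [])
      let common_words2 := PySem.Set.diff common_words pvStopWords
      if common_words2 ≠ [] then
        PySem.Str.join "" ["Common pattern: ",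
          PySem.Str.join ", " ((PySem.List.sorted common_words2 (fun x => x) false).take 10)]
      else pvFirstSummary e0

-- ===== PORT B =====
def find_common_error_pattern_py_alt (errors : List String) : String :=
  match errors with
  | [] => "Unknown error pattern"
  | e0 :: rest =>
    let first := pvFirstSummary e0
    if rest.length = 0 then first
    else
      -- counts[w] = counts.get(w, 0) + 1 over the distinct words of each message
      let counts := (e0 :: rest).foldl
        (fun d err => (pvWordsOf err).foldl (fun d w => d.insert w (d.getD w 0 + 1)) d)
        PySem.Dict.empty
      let common := PySem.List.sorted
        ((counts.items.filter (fun p =>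
            p.2 == ((e0 :: rest).length : Int) && !(PySem.Set.contains pvStopWords p.1))).map (·.1))
        (fun x => x) false
      if common ≠ [] then
        PySem.Str.join "" ["Common pattern: ", PySem.Str.join ", " (common.take 10)]
      else first

-- ===== PRECONDITION & SPEC =====
def Spec_find_common_error_pattern_py (errors : List String) (out : String) : Prop := out = find_common_error_pattern_py_alt errors
instance (errors : List String) (out : String) : Decidable (Spec_find_common_error_pattern_py errors out) := by unfold Spec_find_common_error_pattern_py; infer_instance

-- ===== CLAIM (what is proved, stated in full; the proofs are below) =====
def Claim_equal_find_common_error_pattern_py : Prop := ∀ (errors : List String), Dom_find_common_error_pattern_py errors → Spec_find_common_error_pattern_py errors (find_common_error_pattern_py errors)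

-- ===== LEMMAS AND PROOFS =====

lemma mem_foldl_inter (l : List (PySem.Set String)) (s : PySem.Set String) (w : String) :
    w ∈ l.foldl PySem.Set.inter s ↔ w ∈ s ∧ ∀ t ∈ l, w ∈ t := by
  induction l generalizing s with
  | nil => simp
  | cons t l ih =>
    simp [List.foldl_cons, ih, PySem.Set.mem_inter, and_assoc]

lemma nodup_foldl_inter (l : List (PySem.Set String)) (s : PySem.Set String) (hs : s.Nodup) :
    (l.foldl PySem.Set.inter s).Nodup := by
  induction l generalizing s with
  | nil => exact hs
  | cons t l ih => exact ih _ (PySem.Set.nodup_inter _ _ hs)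

lemma counts_getD (errs : List String) (d : PySem.Dict String Int) (w : String) :
    (errs.foldl (fun d err => (pvWordsOf err).foldl (fun d w => d.insert w (d.getD w 0 + 1)) d) d).getD w 0
      = d.getD w 0 + (errs.countP (fun e => decide (w ∈ pvWordsOf e)) : Int) := by
  induction errs generalizing d with
  | nil => simp
  | cons e errs ih =>
    rw [List.foldl_cons, ih, PySem.Dict.getD_foldl_insert_add_one, List.countP_cons]
    have hn : (pvWordsOf e).Nodup := PySem.Set.nodup_ofList _
    by_cases hw : w ∈ pvWordsOf e
    · rw [List.count_eq_one_of_mem hn hw]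
      simp [hw]; ring
    · rw [List.count_eq_zero_of_not_mem hw]
      simp [hw]

lemma counts_keys_nodup (errs : List String) (d : PySem.Dict String Int) (hd : d.keys.Nodup) :
    (errs.foldl (fun d err => (pvWordsOf err).foldl (fun d w => d.insert w (d.getD w 0 + 1)) d) d).keys.Nodup := by
  induction errs generalizing d with
  | nil => exact hd
  | cons e errs ih =>
    exact ih _ (PySem.Dict.nodup_keys_foldl_insert _ _ _ hd)

lemma mem_counts_keys (errs : List String) (d : PySem.Dict String Int) (w : String) :
    w ∈ (errs.foldl (fun d err => (pvWordsOf err).foldl (fun d w => d.insert w (d.getD w 0 + 1)) d) d).keys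
      ↔ w ∈ d.keys ∨ ∃ e ∈ errs, w ∈ pvWordsOf e := by
  induction errs generalizing d with
  | nil => simp
  | cons e errs ih =>
    rw [List.foldl_cons, ih, PySem.Dict.keys_foldl_insert]
    simp [PySem.Set.mem_update, or_assoc]

-- B's selected word list, sorted, is A's intersection-minus-stop-words, sorted
lemma common_lists_eq (e0 e1 : String) (rs : List String) :
    PySem.List.sorted
      (PySem.Set.diff (((e1 :: rs).map pvWordsOf).foldl PySem.Set.inter (pvWordsOf e0)) pvStopWords)
      (fun x => x) false
    = PySem.List.sorted
      ((((e0 :: e1 :: rs).foldl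
          (fun d err => (pvWordsOf err).foldl (fun d w => d.insert w (d.getD w 0 + 1)) d)
          PySem.Dict.empty).items.filter (fun p =>
            p.2 == ((e0 :: e1 :: rs).length : Int) && !(PySem.Set.contains pvStopWords p.1))).map (·.1))
      (fun x => x) false := by
  set errs : List String := e0 :: e1 :: rs with herr
  set counts : PySem.Dict String Int := errs.foldl
      (fun d err => (pvWordsOf err).foldl (fun d w => d.insert w (d.getD w 0 + 1)) d)
      PySem.Dict.empty with hc
  have hkeys : counts.keys.Nodup := counts_keys_nodup errs _ (by simp [PySem.Dict.keys_empty])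
  have hitems : counts.items = counts.keys.map (fun k => (k, counts.getD k 0)) :=
    PySem.Dict.items_eq_map_keys counts hkeys 0
  rw [hitems, List.filter_map, List.map_map]
  have hmapid : ((fun p : String × Int => p.1) ∘ fun k => (k, counts.getD k 0)) = id := rfl
  rw [hmapid, List.map_id]
  apply PySem.List.sorted_eq_sorted_of_perm _ _ _ (fun a b h => h)
  have ndA : (PySem.Set.diff (((e1 :: rs).map pvWordsOf).foldl PySem.Set.inter (pvWordsOf e0)) pvStopWords).Nodup :=
    PySem.Set.nodup_diff _ _ (nodup_foldl_inter _ _ (PySem.Set.nodup_ofList _))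
  have ndB := hkeys.filter
    (p := ((fun p : String × Int => p.2 == ((errs.length : Nat) : Int) && !(PySem.Set.contains pvStopWords p.1)) ∘ fun k => (k, counts.getD k 0)))
  rw [List.perm_ext_iff_of_nodup ndA ndB]
  intro w
  have hgd : counts.getD w 0 = (errs.countP (fun e => decide (w ∈ pvWordsOf e)) : Int) := by
    rw [hc, counts_getD]; simp
  have hmemk : w ∈ counts.keys ↔ ∃ e ∈ errs, w ∈ pvWordsOf e := by
    rw [hc, mem_counts_keys]; simp [PySem.Dict.keys_empty]
  simp only [List.mem_filter, Function.comp, PySem.Set.mem_diff, mem_foldl_inter, hmemk, hgd,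
    Bool.and_eq_true, Bool.not_eq_true', beq_iff_eq]
  constructor
  · rintro ⟨⟨h0, hall⟩, hstop⟩
    have hA : ∀ e ∈ errs, w ∈ pvWordsOf e := by
      intro e he
      rcases (by simpa [herr] using he : e = e0 ∨ e ∈ e1 :: rs) with rfl | he'
      · exact h0
      · exact hall _ (List.mem_map_of_mem he')
    refine ⟨⟨e0, by simp [herr], hA e0 (by simp [herr])⟩, ?_, ?_⟩
    · have : errs.countP (fun e => decide (w ∈ pvWordsOf e)) = errs.length :=
        List.countP_eq_length.mpr (fun a ha => by simpa using hA a ha)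
      rw [this]
    · simp [hstop]
  · rintro ⟨hk, hcnt, hstop⟩
    have hlen : errs.countP (fun e => decide (w ∈ pvWordsOf e)) = errs.length := by
      exact_mod_cast hcnt
    have hA : ∀ e ∈ errs, w ∈ pvWordsOf e := by
      intro e he; simpa using List.countP_eq_length.mp hlen e he
    refine ⟨⟨hA e0 (by simp [herr]), ?_⟩, ?_⟩
    · intro t ht
      rcases List.mem_map.mp ht with ⟨e, he, rfl⟩
      exact hA e (by simp [herr, he])
    · intro hw; rw [(PySem.Set.contains_iff pvStopWords w).mpr hw] at hstop; simp at hstop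

-- ===== VERDICT (by name: the statement is the Claim_ definition above) =====
theorem find_common_error_pattern_py_spec : Claim_equal_find_common_error_pattern_py := by
  intro errors _
  unfold Spec_find_common_error_pattern_py
  rcases errors with _ | ⟨e0, _ | ⟨e1, rs⟩⟩
  · simp [find_common_error_pattern_py, find_common_error_pattern_py_alt]
  · simp [find_common_error_pattern_py, find_common_error_pattern_py_alt]
  · have h := common_lists_eq e0 e1 rs
    simp only [find_common_error_pattern_py, find_common_error_pattern_py_alt,
      List.length_cons, Nat.succ_ne_zero, if_false, List.map_cons, List.drop_succ_cons,
      List.drop_zero, List.headD_cons]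
    simp only [List.map_cons, List.length_cons] at h
    rw [← h]
    have hiff := PySem.List.sorted_eq_nil_iff
      ((List.foldl PySem.Set.inter (pvWordsOf e0) (pvWordsOf e1 :: List.map pvWordsOf rs)).diff pvStopWords)
      (fun x : String => x) false
    split_ifs with h1 h2 <;> simp_all
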